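-- pv_equiv track=rewrite | github.com/Sarim-Sohail/FlavorFinder-Restaurant-Recommender | models/test.py | average_cost_sort
-- ===== SOURCE A (Python) =====
-- def average_cost_sort(predicted_restraunts):
--     id_costs = {}
--     for restraunt in predicted_restraunts:
--         resID = restraunt['Restaurant ID']
--         cost = restraunt['Average Cost for two']
--         id_costs[resID] = cost
--
--     sorted_id_costs = sorted(id_costs.items(), key=lambda x: x[1])
--     toprestrauntcostids = []
--     count = 1
--     for i in sorted_id_costs:
--         if count <= 10:
--             toprestrauntcostids.append(i[0])
--         count += 1
--
--     topcostrestraunts = []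
--     for restraunt in toprestrauntcostids:
--         for res in predicted_restraunts:
--             if restraunt == res['Restaurant ID']:
--                 topcostrestraunts.append(res)
--
--     return topcostrestraunts
-- ===== SOURCE B (Python) =====
-- def average_cost_sort(predicted_restraunts):
--     id_costs = {}
--     groups = {}
--     for res in predicted_restraunts:
--         rid = res['Restaurant ID']
--         id_costs[rid] = res['Average Cost for two']
--         groups.setdefault(rid, []).append(res)
--     pairs = list(id_costs.items())
--     result = []
--     for _ in range(10):
--         if not pairs:
--             break
--         best = min(pairs, key=lambda p: p[1])
--         pairs.remove(best)
--         result.extend(groups[best[0]])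
--     return result
-- ===== Notes on version B (the rewrite author's own statement) =====
-- stated objective: faster
-- what changed: B never sorts: it builds an id->cost list and an id->records index in one pass, then performs 10 rounds of stable min-extraction (partial selection) over the (id,cost) pairs and concatenates the indexed groups, replacing A's full sort plus a quadratic rescan of the input for each selected id.
import Mathlib
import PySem

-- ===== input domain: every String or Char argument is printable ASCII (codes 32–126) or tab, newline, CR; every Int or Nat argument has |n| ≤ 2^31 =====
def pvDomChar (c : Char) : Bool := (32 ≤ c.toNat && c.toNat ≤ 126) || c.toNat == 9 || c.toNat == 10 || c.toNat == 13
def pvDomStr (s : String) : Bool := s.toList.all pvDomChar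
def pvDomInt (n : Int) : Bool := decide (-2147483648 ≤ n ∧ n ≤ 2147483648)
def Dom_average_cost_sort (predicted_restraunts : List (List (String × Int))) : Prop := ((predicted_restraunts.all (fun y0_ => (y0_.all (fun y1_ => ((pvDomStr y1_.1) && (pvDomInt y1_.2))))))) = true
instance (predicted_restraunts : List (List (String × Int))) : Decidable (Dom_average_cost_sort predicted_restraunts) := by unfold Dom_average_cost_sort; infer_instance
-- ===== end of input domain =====

-- B never sorts: one pass builds the id→cost pairs and an id→records index, then 10 rounds of
-- stable min-extraction (partial selection) pick the cheapest ids and their indexed groups are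
-- concatenated, instead of A's full sort followed by a rescan of the whole input per selected id.
-- Pre_ excludes exactly the inputs where Python A raises KeyError (a record missing one of the
-- two keys); Python B raises there too.

-- ===== PORT A =====
-- record['key'] with a 0 default; Pre_ guarantees the key is present, where it is exact Python dict lookup.
def pvGet (r : List (String × Int)) (k : String) : Int := (PySem.Dict.mk r).getD k 0

def average_cost_sort (predicted_restraunts : List (List (String × Int))) : List (List (String × Int)) :=
  let id_costs : PySem.Dict Int Int :=
    predicted_restraunts.foldl
      (fun d restraunt => d.insert (pvGet restraunt "Restaurant ID") (pvGet restraunt "Average Cost for two"))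
      PySem.Dict.empty
  let sorted_id_costs := PySem.List.sorted id_costs.items (fun x => x.2)
  let st :=
    sorted_id_costs.foldl
      (fun (st : List Int × Int) i => (if st.2 ≤ 10 then st.1 ++ [i.1] else st.1, st.2 + 1))
      ([], (1 : Int))
  let toprestrauntcostids := st.1
  toprestrauntcostids.foldl
    (fun acc restraunt =>
      predicted_restraunts.foldl
        (fun acc2 res => if restraunt == pvGet res "Restaurant ID" then acc2 ++ [res] else acc2)
        acc)
    []

-- ===== PORT B =====
-- B's 'for _ in range(10)' loop: break when pairs is empty (min? = none exactly then);
-- 'pairs.remove(best)' is List.erase since best ∈ pairs (PySem.List.min?_mem with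
-- PySem.List.remove?_eq_some_erase make this exact).
def selLoop (fuel : Nat) (pairs : List (Int × Int))
    (groups : PySem.Dict Int (List (List (String × Int))))
    (result : List (List (String × Int))) : List (List (String × Int)) :=
  match fuel with
  | 0 => result
  | n + 1 =>
    match PySem.List.min? pairs (fun p => p.2) with
    | none => result
    | some best => selLoop n (pairs.erase best) groups (result ++ groups.getD best.1 [])

def average_cost_sort_alt (predicted_restraunts : List (List (String × Int))) : List (List (String × Int)) :=
  let st : PySem.Dict Int Int × PySem.Dict Int (List (List (String × Int))) :=
    predicted_restraunts.foldl
      (fun st res =>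
        let rid := pvGet res "Restaurant ID"
        (st.1.insert rid (pvGet res "Average Cost for two"),
         st.2.modify rid [] (fun g => g ++ [res])))
      (PySem.Dict.empty, PySem.Dict.empty)
  selLoop 10 st.1.items st.2 []

-- ===== PRECONDITION & SPEC =====
-- Pre_: every record contains both keys; exactly there Python A returns (else it raises KeyError).
def Pre_average_cost_sort (predicted_restraunts : List (List (String × Int))) : Prop :=
  ∀ r ∈ predicted_restraunts,
    (PySem.Dict.mk r).contains "Restaurant ID" = true ∧
    (PySem.Dict.mk r).contains "Average Cost for two" = true
instance (predicted_restraunts : List (List (String × Int))) : Decidable (Pre_average_cost_sort predicted_restraunts) := by unfold Pre_average_cost_sort; infer_instance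

def pvWitness_average_cost_sort : (List (List (String × Int))) :=
  [[("Restaurant ID", 1), ("Average Cost for two", 30)],
   [("Restaurant ID", 2), ("Average Cost for two", 10)]]

def Spec_average_cost_sort (predicted_restraunts : List (List (String × Int))) (out : List (List (String × Int))) : Prop := out = average_cost_sort_alt predicted_restraunts
instance (predicted_restraunts : List (List (String × Int))) (out : List (List (String × Int))) : Decidable (Spec_average_cost_sort predicted_restraunts out) := by unfold Spec_average_cost_sort; infer_instance

-- ===== CLAIM (what is proved, stated in full; the proofs are below) =====
def Claim_equal_average_cost_sort : Prop := ∀ (predicted_restraunts : List (List (String × Int))), Dom_average_cost_sort predicted_restraunts → Pre_average_cost_sort predicted_restraunts → Spec_average_cost_sort predicted_restraunts (average_cost_sort predicted_restraunts)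

-- ===== LEMMAS AND PROOFS =====

-- B's single pass splits into A's id_costs pass (first component) and a grouping pass (second component).
theorem alt_fold_split (l : List (List (String × Int)))
    (d : PySem.Dict Int Int) (g : PySem.Dict Int (List (List (String × Int)))) :
    l.foldl
      (fun st res =>
        ((st : PySem.Dict Int Int × PySem.Dict Int (List (List (String × Int)))).1.insert
            (pvGet res "Restaurant ID") (pvGet res "Average Cost for two"),
         st.2.modify (pvGet res "Restaurant ID") [] (fun gr => gr ++ [res])))
      (d, g)
    = (l.foldl (fun d r => d.insert (pvGet r "Restaurant ID") (pvGet r "Average Cost for two")) d,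
       (l.map (fun r => (pvGet r "Restaurant ID", r))).foldl
         (fun g p => g.modify p.1 [] (fun gr => gr ++ [p.2])) g) := by
  induction l generalizing d g with
  | nil => rfl
  | cons r t ih => simp [List.foldl_cons, ih]

-- A's count loop over the sorted list keeps exactly the first-10 ids.
theorem count_loop_take (l : List (Int × Int)) (acc : List Int) (c : Int) :
    (l.foldl (fun (st : List Int × Int) i => (if st.2 ≤ 10 then st.1 ++ [i.1] else st.1, st.2 + 1))
        (acc, c)).1
    = acc ++ (l.take (11 - c).toNat).map (fun p => p.1) := by
  induction l generalizing acc c with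
  | nil => simp
  | cons p t ih =>
    simp only [List.foldl_cons]
    by_cases h : c ≤ 10
    · rw [if_pos (by exact h), ih]
      have : (11 - c).toNat = (11 - (c + 1)).toNat + 1 := by omega
      rw [this]
      simp
    · rw [if_neg (by exact h), ih]
      have h1 : (11 - c).toNat = 0 := by omega
      have h2 : (11 - (c + 1)).toNat = 0 := by omega
      simp [h1, h2]

-- A's inner rescan collects exactly the records whose id matches.
theorem inner_scan_filter (preds : List (List (String × Int))) (rid : Int)
    (acc : List (List (String × Int))) :
    preds.foldl (fun acc2 res => if rid == pvGet res "Restaurant ID" then acc2 ++ [res] else acc2) acc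
    = acc ++ preds.filter (fun res => pvGet res "Restaurant ID" == rid) := by
  have := PySem.List.foldl_append_if (fun res => rid == pvGet res "Restaurant ID") id preds acc
  simp only [id] at this
  rw [this, List.map_id]
  congr 1
  apply List.filter_congr
  intro r _
  exact BEq.comm

-- B's group lookup is that same filter.
theorem group_getD (preds : List (List (String × Int))) (rid : Int) :
    ((preds.map (fun r => (pvGet r "Restaurant ID", r))).foldl
        (fun g p => g.modify p.1 [] (fun gr => gr ++ [p.2]))
        (PySem.Dict.empty : PySem.Dict Int (List (List (String × Int))))).getD rid []
    = preds.filter (fun res => pvGet res "Restaurant ID" == rid) := by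
  rw [PySem.Dict.getD_foldl_modify_append]
  rw [List.filter_map]
  simp [Function.comp_def]

-- Concatenating the groups of a list of ids, on either side.
theorem fold_groups (ids : List (Int × Int)) (preds : List (List (String × Int)))
    (acc : List (List (String × Int))) :
    ids.foldl
      (fun result p =>
        result ++
          ((preds.map (fun r => (pvGet r "Restaurant ID", r))).foldl
            (fun g q => g.modify q.1 [] (fun gr => gr ++ [q.2]))
            (PySem.Dict.empty : PySem.Dict Int (List (List (String × Int))))).getD p.1 [])
      acc
    = (ids.map (fun p => p.1)).foldl
        (fun acc restraunt =>
          preds.foldl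
            (fun acc2 res => if restraunt == pvGet res "Restaurant ID" then acc2 ++ [res] else acc2)
            acc)
        acc := by
  induction ids generalizing acc with
  | nil => rfl
  | cons p t ih =>
    simp only [List.foldl_cons, List.map_cons]
    rw [ih, group_getD, inner_scan_filter]

-- Appending one element on the right inserts it into the sorted list (after all equal keys).
theorem sorted_snoc (l : List (Int × Int)) (x : Int × Int) :
    PySem.List.sorted (l ++ [x]) (fun p => p.2) false
    = PySem.List.insertBy (fun a b => decide (a.2 < b.2)) x
        (PySem.List.sorted l (fun p => p.2) false) := by
  simp [PySem.List.sorted, List.foldl_append]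

-- min? of a snoc, one fold step.
theorem min?_snoc (l : List (Int × Int)) (x : Int × Int) :
    PySem.List.min? (l ++ [x]) (fun p => p.2)
    = match PySem.List.min? l (fun p => p.2) with
      | none => some x
      | some m => if x.2 < m.2 then some x else some m := by
  cases hl : PySem.List.min? l (fun p => p.2) with
  | none =>
    have : l = [] := (PySem.List.min?_eq_none_iff _ _).mp hl
    subst this
    rfl
  | some m =>
    simp only [PySem.List.min?] at hl ⊢
    rw [List.foldl_append, hl]
    rfl

-- If x's key is strictly below every key in l, insertBy puts x in front of sorted l.
theorem insertBy_front (l : List (Int × Int)) (x : Int × Int)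
    (h : ∀ y ∈ l, x.2 < y.2) :
    PySem.List.insertBy (fun a b => decide (a.2 < b.2)) x
        (PySem.List.sorted l (fun p => p.2) false)
    = x :: PySem.List.sorted l (fun p => p.2) false := by
  cases hs : PySem.List.sorted l (fun p => p.2) false with
  | nil => simp [PySem.List.insertBy]
  | cons hd tl =>
    have hmem : hd ∈ l := by
      have : hd ∈ PySem.List.sorted l (fun p => p.2) false := by rw [hs]; exact List.mem_cons_self
      exact (PySem.List.mem_sorted _ _ _ _).mp this
    simp [PySem.List.insertBy, h hd hmem]

-- THE CORE: stable sort = first-minimum extraction.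
theorem sorted_cons_min (l : List (Int × Int)) (m : Int × Int)
    (h : PySem.List.min? l (fun p => p.2) = some m) :
    PySem.List.sorted l (fun p => p.2) false
    = m :: PySem.List.sorted (l.erase m) (fun p => p.2) false := by
  induction l using List.reverseRecOn generalizing m with
  | nil => simp [PySem.List.min?] at h
  | append_singleton l x ih =>
    rw [min?_snoc] at h
    cases hl : PySem.List.min? l (fun p => p.2) with
    | none =>
      have : l = [] := (PySem.List.min?_eq_none_iff _ _).mp hl
      subst this
      simp only [hl] at h
      cases h
      simp [PySem.List.sorted, PySem.List.insertBy, List.erase_cons_head]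
    | some m0 =>
      simp only [hl] at h
      by_cases hx : x.2 < m0.2
      · rw [if_pos hx] at h
        cases h
        have hlt : ∀ y ∈ l, x.2 < y.2 := fun y hy =>
          lt_of_lt_of_le hx (PySem.List.min?_isMin hl y hy)
        have hnotmem : x ∉ l := fun hm => lt_irrefl _ (hlt x hm)
        rw [sorted_snoc, insertBy_front l x hlt]
        rw [List.erase_append_right _ hnotmem, List.erase_cons_head, List.append_nil]
      · rw [if_neg hx] at h
        cases h
        have hmem : m ∈ l := PySem.List.min?_mem hl
        rw [sorted_snoc, ih m hl]
        have hx' : ¬ (x.2 < m.2) := hx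
        simp only [PySem.List.insertBy, hx', decide_false]
        rw [List.erase_append_left _ hmem, sorted_snoc]
        simp

-- B's extraction loop = fold over the first n elements of the sorted pair list.
theorem selLoop_eq (n : Nat) (pairs : List (Int × Int))
    (groups : PySem.Dict Int (List (List (String × Int))))
    (res : List (List (String × Int))) :
    selLoop n pairs groups res
    = ((PySem.List.sorted pairs (fun p => p.2) false).take n).foldl
        (fun acc p => acc ++ groups.getD p.1 []) res := by
  induction n generalizing pairs res with
  | zero => simp [selLoop]
  | succ n ih =>
    cases hmin : PySem.List.min? pairs (fun p => p.2) with
    | none =>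
      have : pairs = [] := (PySem.List.min?_eq_none_iff _ _).mp hmin
      subst this
      simp [selLoop, hmin, PySem.List.sorted]
    | some best =>
      rw [sorted_cons_min pairs best hmin]
      simp only [List.take_succ_cons, List.foldl_cons]
      simp [selLoop, hmin, ih]

-- ===== VERDICT (by name: the statement is the Claim_ definition above) =====
theorem average_cost_sort_spec : Claim_equal_average_cost_sort := by
  intro preds _ _
  unfold Spec_average_cost_sort average_cost_sort average_cost_sort_alt
  dsimp only
  rw [alt_fold_split, selLoop_eq]
  rw [count_loop_take, fold_groups]
  rfl
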